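-- pv_equiv track=rewrite | github.com/argriffing/xgcode | SeekEigenLacing.py | gen_assignments_brute
-- ===== SOURCE A (Python) =====
-- import itertools
--
-- def gen_assignments_brute(
--         id_to_adj, id_to_val,
--         ntarget, nbranches, internals):
--     """
--     This is like gen_assignments except it is slow.
--     This is for testing.
--     """
--     ninternals = len(internals)
--     for values in itertools.product((-1, 1), repeat=ninternals):
--         for x, value in zip(internals, values):
--             id_to_val[x] = value
--         id_to_region = get_regions(id_to_adj, id_to_val)
--         nregions = len(set(id_to_region.values()))
--         if nregions == ntarget + 1:
--             yield dict(id_to_val)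
--     for x in internals:
--         id_to_val[x] = None
--
-- def get_regions(id_to_adj, id_to_val):
--     """
--     Find connected regions with uniform value.
--     Assume a tree topology.
--     Each region will get an arbitrary color.
--     @param id_to_adj: maps an id to a list of adjacent ids
--     @param id_to_val: maps an id to a value
--     @return: a map from id to region
--     """
--     # begin with the min id for determinism for testing
--     x = min(id_to_adj)
--     id_to_region = {x : 0}
--     nregions = 1
--     shell = set([x])
--     visited = set([x])
--     while shell:
--         next_shell = set()
--         for v in shell:
--             v_val = id_to_val[v]
--             v_region = id_to_region[v]
--             # sort for determinism for testing
--             for u in sorted(id_to_adj[v]):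
--                 if u not in visited:
--                     u_val = id_to_val[u]
--                     if u_val == v_val:
--                         id_to_region[u] = v_region
--                     else:
--                         id_to_region[u] = nregions
--                         nregions += 1
--                     visited.add(u)
--                     next_shell.add(u)
--         shell = next_shell
--     return id_to_region
-- ===== SOURCE B (Python) =====
-- import itertools
--
-- def gen_assignments_brute(
--         id_to_adj, id_to_val,
--         ntarget, nbranches, internals):
--     # One value-independent BFS collects the discovery edges once; each assignment
--     # is then judged by counting discordant edges (on a forest, the number of
--     # uniform regions is 1 + the number of boundary edges), instead of rebuilding
--     # and relabelling a region map per assignment.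
--     # Like the original, this mutates id_to_val in place (and resets internals to None).
--     x = min(id_to_adj)
--     pairs = []
--     visited = set([x])
--     shell = [x]
--     while shell:
--         nxt = []
--         for v in shell:
--             for u in sorted(id_to_adj[v]):
--                 if u not in visited:
--                     pairs.append((v, u))
--                     visited.add(u)
--                     nxt.append(u)
--         shell = nxt
--     for values in itertools.product((-1, 1), repeat=len(internals)):
--         for k, value in zip(internals, values):
--             id_to_val[k] = value
--         nboundary = sum(1 for v, u in pairs if id_to_val[v] != id_to_val[u])
--         if nboundary == ntarget:
--             yield dict(id_to_val)
--     for k in internals: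
--         id_to_val[k] = None
-- ===== Notes on version B (the rewrite author's own statement) =====
-- stated objective: faster
-- what changed: A reruns a full BFS region labelling and a set-of-labels count for every one of the 2^n candidate assignments; B runs one value-independent BFS up front to collect the discovery edges and then, per assignment, merely counts edges whose endpoints get different values (nregions = 1 + nboundary on the tree/forest inputs the function is specified for).
import Mathlib
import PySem

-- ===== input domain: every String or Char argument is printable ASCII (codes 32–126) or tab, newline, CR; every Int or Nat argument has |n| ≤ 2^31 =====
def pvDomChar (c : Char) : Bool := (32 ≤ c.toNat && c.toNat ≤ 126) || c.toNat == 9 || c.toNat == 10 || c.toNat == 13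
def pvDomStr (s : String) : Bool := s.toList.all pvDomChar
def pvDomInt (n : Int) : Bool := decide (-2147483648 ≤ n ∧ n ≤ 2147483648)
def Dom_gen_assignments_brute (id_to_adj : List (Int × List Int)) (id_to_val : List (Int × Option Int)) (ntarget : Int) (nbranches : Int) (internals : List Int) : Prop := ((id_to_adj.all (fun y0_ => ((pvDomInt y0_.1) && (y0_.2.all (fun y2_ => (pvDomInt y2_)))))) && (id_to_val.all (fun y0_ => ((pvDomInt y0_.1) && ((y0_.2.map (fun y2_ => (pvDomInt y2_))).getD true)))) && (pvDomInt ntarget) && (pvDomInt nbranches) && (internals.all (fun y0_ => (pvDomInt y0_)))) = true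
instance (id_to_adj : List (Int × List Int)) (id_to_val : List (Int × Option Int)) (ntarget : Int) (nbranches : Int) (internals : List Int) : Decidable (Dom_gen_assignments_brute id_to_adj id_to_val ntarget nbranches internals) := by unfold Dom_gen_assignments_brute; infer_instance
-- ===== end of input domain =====

-- B replaces A's per-assignment BFS region labelling by ONE value-independent BFS collecting
-- discovery edges, then counts discordant edges per assignment (on Pre_'s forest domain,
-- nregions = 1 + nboundary).  Both A and B mutate the id_to_val argument in place (internals set,
-- then reset to None); the equivalence proved here is about the RETURN value (the yielded dicts).

-- itertools.product((-1, 1), repeat=n), used by both Pythons (standard library)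
def pyProductPM : Nat → List (List Int)
  | 0 => [[]]
  | n + 1 => ((pyProductPM n).map (fun t => -1 :: t)) ++ ((pyProductPM n).map (fun t => 1 :: t))

-- both BFS loops run the identical shell recursion; one shared fuel bound, never reached
-- (each round with a nonempty shell adds a fresh visited node, all drawn from root ∪ adjacency lists)
def bfsFuel (id_to_adj : List (Int × List Int)) : Nat :=
  (id_to_adj.map (fun p => p.2.length)).sum + 2

-- ===== PORT A =====
-- get_regions' inner 'if u not in visited' body; state (id_to_region, nregions, visited, next_shell)
def aDiscover (valD : PySem.Dict Int (Option Int)) (vVal : Option Int) (vRegion : Int)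
    (st : PySem.Dict Int Int × Int × PySem.Set Int × PySem.Set Int) (u : Int) :
    PySem.Dict Int Int × Int × PySem.Set Int × PySem.Set Int :=
  if PySem.Set.contains st.2.2.1 u then st
  else
    let uVal := (valD.get? u).getD none   -- id_to_val[u]; KeyError excluded by Pre_
    if uVal == vVal then
      (st.1.insert u vRegion, st.2.1, PySem.Set.add st.2.2.1 u, PySem.Set.add st.2.2.2 u)
    else
      (st.1.insert u st.2.1, st.2.1 + 1, PySem.Set.add st.2.2.1 u, PySem.Set.add st.2.2.2 u)

-- 'v_val = id_to_val[v]; v_region = id_to_region[v]; for u in sorted(id_to_adj[v]): …'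
def aVisit (adjD : PySem.Dict Int (List Int)) (valD : PySem.Dict Int (Option Int))
    (st : PySem.Dict Int Int × Int × PySem.Set Int × PySem.Set Int) (v : Int) :
    PySem.Dict Int Int × Int × PySem.Set Int × PySem.Set Int :=
  (PySem.List.sorted ((adjD.get? v).getD []) (fun y => y) false).foldl
    (aDiscover valD ((valD.get? v).getD none) ((st.1.get? v).getD 0)) st

-- 'while shell:' loop; state (id_to_region, nregions, visited); shell is a Python set iterated in
-- insertion order (inside Pre_'s forest domain the result does not depend on the iteration order)
def aBFS (adjD : PySem.Dict Int (List Int)) (valD : PySem.Dict Int (Option Int)) :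
    Nat → PySem.Set Int → PySem.Dict Int Int × Int × PySem.Set Int → PySem.Dict Int Int
  | 0, _, st => st.1
  | fuel + 1, shell, st =>
    if shell = [] then st.1
    else
      let st' := shell.foldl (aVisit adjD valD) (st.1, st.2.1, st.2.2, PySem.Set.empty)
      aBFS adjD valD fuel st'.2.2.2 (st'.1, st'.2.1, st'.2.2.1)

def getRegionsA (adjD : PySem.Dict Int (List Int)) (valD : PySem.Dict Int (Option Int))
    (fuel : Nat) : PySem.Dict Int Int :=
  match PySem.List.min? adjD.keys (fun y => y) with
  | none => PySem.Dict.empty   -- min() raises ValueError on an empty dict; excluded by Pre_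
  | some x =>
      aBFS adjD valD fuel (PySem.Set.ofList [x]) (PySem.Dict.ofList [(x, 0)], 1, PySem.Set.ofList [x])

def gen_assignments_brute (id_to_adj : List (Int × List Int)) (id_to_val : List (Int × Option Int)) (ntarget : Int) (nbranches : Int) (internals : List Int) : List (List (Int × Int)) :=
  ((pyProductPM internals.length).foldl
    (fun (acc : List (List (Int × Int)) × PySem.Dict Int (Option Int)) values =>
      let cur := (internals.zip values).foldl (fun d p => d.insert p.1 (some p.2)) acc.2
      -- nregions = len(set(get_regions(id_to_adj, id_to_val).values()))
      if (((PySem.Set.ofList (getRegionsA (PySem.Dict.ofList id_to_adj) cur (bfsFuel id_to_adj)).values).length : Int) == ntarget + 1) then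
        -- dict(id_to_val); no value is None here under Pre_, so .getD 0 is never taken
        (acc.1 ++ [cur.items.map (fun p => (p.1, p.2.getD 0))], cur)
      else (acc.1, cur))
    ([], PySem.Dict.ofList id_to_val)).1
  -- the trailing 'for x in internals: id_to_val[x] = None' only mutates the argument; no return effect

-- ===== PORT B =====
-- one value-independent BFS collecting discovery edges; state (pairs, visited, next shell)
def bStep (v : Int) (st : List (Int × Int) × PySem.Set Int × List Int) (u : Int) :
    List (Int × Int) × PySem.Set Int × List Int :=
  if PySem.Set.contains st.2.1 u then st
  else (st.1 ++ [(v, u)], PySem.Set.add st.2.1 u, st.2.2 ++ [u])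

def bVisit (adjD : PySem.Dict Int (List Int)) (st : List (Int × Int) × PySem.Set Int × List Int)
    (v : Int) : List (Int × Int) × PySem.Set Int × List Int :=
  (PySem.List.sorted ((adjD.get? v).getD []) (fun y => y) false).foldl (bStep v) st

def bBFS (adjD : PySem.Dict Int (List Int)) :
    Nat → List Int → PySem.Set Int → List (Int × Int) → List (Int × Int)
  | 0, _, _, pairs => pairs
  | fuel + 1, shell, visited, pairs =>
    if shell = [] then pairs
    else
      let st := shell.foldl (bVisit adjD) (pairs, visited, ([] : List Int))
      bBFS adjD fuel st.2.2 st.2.1 st.1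

-- nboundary = sum(1 for v, u in pairs if id_to_val[v] != id_to_val[u])
def mismCount (valD : PySem.Dict Int (Option Int)) (pairs : List (Int × Int)) : Nat :=
  pairs.countP (fun p => !((valD.get? p.1).getD none == (valD.get? p.2).getD none))

def gen_assignments_brute_alt (id_to_adj : List (Int × List Int)) (id_to_val : List (Int × Option Int)) (ntarget : Int) (nbranches : Int) (internals : List Int) : List (List (Int × Int)) :=
  match PySem.List.min? (PySem.Dict.ofList id_to_adj).keys (fun y => y) with
  | none => []   -- Source B's min() raises ValueError here as well; excluded by Pre_
  | some x =>
    ((pyProductPM internals.length).foldl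
      (fun (acc : List (List (Int × Int)) × PySem.Dict Int (Option Int)) values =>
        let cur := (internals.zip values).foldl (fun d p => d.insert p.1 (some p.2)) acc.2
        if ((mismCount cur (bBFS (PySem.Dict.ofList id_to_adj) (bfsFuel id_to_adj) [x] (PySem.Set.ofList [x]) []) : Int) == ntarget) then
          (acc.1 ++ [cur.items.map (fun p => (p.1, p.2.getD 0))], cur)
        else (acc.1, cur))
      ([], PySem.Dict.ofList id_to_val)).1

-- ===== PRECONDITION & SPEC =====
-- Pre_ excludes: (a) empty id_to_adj, where A raises ValueError (min of an empty dict), and inputs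
-- whose BFS-reachable part references ids missing from the dicts, where A raises KeyError (the ∃ R
-- below is a closed superset of the reachable part with all lookups defined); and, only when a
-- yield is possible at all (0 < ntarget+1 ≤ number of ids, since nregions always lies in that
-- range): (b) inputs on which some node could be discovered from two different shell nodes
-- (neither at most one in-edge inside R, nor a symmetric loop-free forest on R) — there A still
-- returns, but its region count depends on CPython's set iteration order, an accident of A's
-- implementation; (c) non-internal ids mapped to None, whose yielded dicts would leave the
-- declared return type List (Int × Int).
def Pre_gen_assignments_brute (id_to_adj : List (Int × List Int)) (id_to_val : List (Int × Option Int)) (ntarget : Int) (nbranches : Int) (internals : List Int) : Prop :=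
  id_to_adj ≠ [] ∧
  ∃ R ∈ (id_to_adj.map (·.1)).toFinset.powerset,
    (∃ x ∈ R, ∀ k ∈ id_to_adj.map (·.1), x ≤ k) ∧
    (∀ p ∈ id_to_adj, p.1 ∈ R → ∀ u ∈ p.2, u ∈ R) ∧
    (∀ v ∈ R, v ∈ id_to_val.map (·.1) ∨ v ∈ internals) ∧
    (ntarget + 1 ≤ 0 ∨
     ((PySem.Set.ofList (id_to_adj.map (·.1))).length : Int) < ntarget + 1 ∨
     ((∀ p ∈ id_to_val, p.2 = none → p.1 ∈ internals) ∧
      ((∀ u ∈ R, (id_to_adj.filter (fun p => decide (p.1 ∈ R) && p.2.contains u)).length ≤ 1) ∨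
       ((id_to_adj.map (·.1)).Nodup ∧
        (∀ p ∈ id_to_adj, p.1 ∈ R → p.2.Nodup ∧ p.1 ∉ p.2 ∧
           ∀ u ∈ p.2, ∃ q ∈ id_to_adj, q.1 = u ∧ p.1 ∈ q.2) ∧
        (∀ S ∈ R.powerset, S.Nonempty →
           ∃ p ∈ id_to_adj, p.1 ∈ S ∧ (p.2.filter (fun u => decide (u ∈ S))).length ≤ 1)))))

instance (id_to_adj : List (Int × List Int)) (id_to_val : List (Int × Option Int)) (ntarget : Int) (nbranches : Int) (internals : List Int) : Decidable (Pre_gen_assignments_brute id_to_adj id_to_val ntarget nbranches internals) := by unfold Pre_gen_assignments_brute; infer_instance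

def pvWitness_gen_assignments_brute : (List (Int × List Int)) × (List (Int × Option Int)) × Int × Int × List Int :=
  ([(0, [1]), (1, [0])], [(0, some 1), (1, none)], 1, 1, [1])

def Spec_gen_assignments_brute (id_to_adj : List (Int × List Int)) (id_to_val : List (Int × Option Int)) (ntarget : Int) (nbranches : Int) (internals : List Int) (out : List (List (Int × Int))) : Prop := out = gen_assignments_brute_alt id_to_adj id_to_val ntarget nbranches internals
instance (id_to_adj : List (Int × List Int)) (id_to_val : List (Int × Option Int)) (ntarget : Int) (nbranches : Int) (internals : List Int) (out : List (List (Int × Int))) : Decidable (Spec_gen_assignments_brute id_to_adj id_to_val ntarget nbranches internals out) := by unfold Spec_gen_assignments_brute; infer_instance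

-- ===== CLAIM (what is proved, stated in full; the proofs are below) =====
def Claim_equal_gen_assignments_brute : Prop := ∀ (id_to_adj : List (Int × List Int)) (id_to_val : List (Int × Option Int)) (ntarget : Int) (nbranches : Int) (internals : List Int), Dom_gen_assignments_brute id_to_adj id_to_val ntarget nbranches internals → Pre_gen_assignments_brute id_to_adj id_to_val ntarget nbranches internals → Spec_gen_assignments_brute id_to_adj id_to_val ntarget nbranches internals (gen_assignments_brute id_to_adj id_to_val ntarget nbranches internals)

-- ===== LEMMAS AND PROOFS =====

-- The joint loop invariant tying A's BFS state to B's: A's region map has exactly the visited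
-- nodes as keys, its label set is {0, …, nregions-1}, and nregions is one more than the number of
-- discordant discovery pairs collected so far.
def BfsInv (valD : PySem.Dict Int (Option Int)) (region : PySem.Dict Int Int) (nreg : Int)
    (vis : PySem.Set Int) (pairs : List (Int × Int)) : Prop :=
  region.keys = vis ∧
  PySem.Set.ofList region.values = PySem.List.pyRange 0 nreg 1 ∧
  nreg = 1 + (mismCount valD pairs : Int)

theorem getD_mem_values (d : PySem.Dict Int Int) (k : Int) (h : k ∈ d.keys) (dflt : Int) :
    d.getD k dflt ∈ d.values := by
  have hc := (PySem.Dict.contains_iff_mem_keys (d := d) (k := k)).mpr h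
  rw [PySem.Dict.contains_eq_isSome_get?] at hc
  obtain ⟨w, hw⟩ := Option.isSome_iff_exists.mp hc
  have hm := PySem.Dict.mem_items_of_get?_eq_some d hw
  rw [PySem.Dict.getD_eq_get?_getD, hw]
  simp only [PySem.Dict.values, Option.getD_some]
  exact List.mem_map_of_mem hm

theorem inner_corr (valD : PySem.Dict Int (Option Int)) (v vRegion : Int) :
    ∀ (us : List Int) (region : PySem.Dict Int Int) (nreg : Int) (vis nxt : PySem.Set Int)
      (pairs : List (Int × Int)),
    BfsInv valD region nreg vis pairs →
    0 ≤ vRegion → vRegion < nreg →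
    (∀ y ∈ nxt, y ∈ vis) →
    ∃ region' nreg' vis' nxt' pairs',
      us.foldl (aDiscover valD ((valD.get? v).getD none) vRegion) (region, nreg, vis, nxt)
        = (region', nreg', vis', nxt') ∧
      us.foldl (bStep v) (pairs, vis, nxt) = (pairs', vis', nxt') ∧
      BfsInv valD region' nreg' vis' pairs' ∧
      nreg ≤ nreg' ∧ (∀ y ∈ vis, y ∈ vis') ∧ (∀ y ∈ nxt', y ∈ vis') := by
  intro us
  induction us with
  | nil =>
    intro region nreg vis nxt pairs hinv h0 hlt hnxt
    exact ⟨region, nreg, vis, nxt, pairs, rfl, rfl, hinv, le_refl _, fun _ h => h, hnxt⟩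
  | cons u us ih =>
    intro region nreg vis nxt pairs hinv h0 hlt hnxt
    obtain ⟨h1, h2, h3⟩ := hinv
    simp only [List.foldl_cons]
    by_cases hc : PySem.Set.contains vis u = true
    · have hA : aDiscover valD ((valD.get? v).getD none) vRegion (region, nreg, vis, nxt) u
          = (region, nreg, vis, nxt) := by
        simp only [aDiscover, hc, if_true]
      have hB : bStep v (pairs, vis, nxt) u = (pairs, vis, nxt) := by
        simp only [bStep, hc, if_true]
      rw [hA, hB]
      exact ih region nreg vis nxt pairs ⟨h1, h2, h3⟩ h0 hlt hnxt
    · have hcf : PySem.Set.contains vis u = false := by simpa using hc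
      have hu : u ∉ vis := by
        intro hmem
        exact hc ((PySem.Set.contains_iff _ _).mpr hmem)
      have hunk : u ∉ region.keys := h1 ▸ hu
      have hukc : region.contains u = false := by
        rw [← Bool.not_eq_true, PySem.Dict.contains_iff_mem_keys]; exact hunk
      have hvisadd : PySem.Set.add vis u = vis ++ [u] := PySem.Set.add_of_not_mem hu
      have hnxtadd : PySem.Set.add nxt u = nxt ++ [u] :=
        PySem.Set.add_of_not_mem (fun h => hu (hnxt u h))
      have hB : bStep v (pairs, vis, nxt) u = (pairs ++ [(v, u)], vis ++ [u], nxt ++ [u]) := by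
        simp only [bStep, hcf, Bool.false_eq_true, if_false, hvisadd]
      have hnxt' : ∀ y ∈ (nxt ++ [u] : List Int), y ∈ (vis ++ [u] : List Int) := by
        intro y hy
        rcases List.mem_append.mp hy with h | h
        · exact List.mem_append.mpr (Or.inl (hnxt y h))
        · exact List.mem_append.mpr (Or.inr h)
      by_cases hv : ((valD.get? u).getD none == (valD.get? v).getD none) = true
      · have hA : aDiscover valD ((valD.get? v).getD none) vRegion (region, nreg, vis, nxt) u
            = (region.insert u vRegion, nreg, vis ++ [u], nxt ++ [u]) := by
          simp only [aDiscover, hcf, Bool.false_eq_true, if_false, hv, if_true, hvisadd, hnxtadd]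
        rw [hA, hB]
        have hk : (region.insert u vRegion).keys = vis ++ [u] := by
          rw [PySem.Dict.keys_insert_of_not_contains _ _ hukc, h1]
        have hvals : (region.insert u vRegion).values = region.values ++ [vRegion] := by
          simp only [PySem.Dict.values, PySem.Dict.items_insert_of_not_contains _ _ hukc,
            List.map_append, List.map_cons, List.map_nil]
        have hset : PySem.Set.ofList (region.insert u vRegion).values
            = PySem.List.pyRange 0 nreg 1 := by
          rw [hvals, PySem.Set.ofList_append_singleton, h2,
            PySem.Set.add_of_mem (PySem.List.mem_pyRange_one.mpr ⟨h0, hlt⟩)]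
        have hmism : mismCount valD (pairs ++ [(v, u)]) = mismCount valD pairs := by
          have hvv : (((valD.get? v).getD none == (valD.get? u).getD none)) = true :=
            beq_iff_eq.mpr (beq_iff_eq.mp hv).symm
          simp [mismCount, List.countP_append, hvv]
        obtain ⟨r', n', vi', nx', p', e1, e2, hinv', hle, hvs, hxs⟩ :=
          ih (region.insert u vRegion) nreg (vis ++ [u]) (nxt ++ [u]) (pairs ++ [(v, u)])
            ⟨hk, hset, by rw [hmism]; exact h3⟩ h0 hlt hnxt'
        refine ⟨r', n', vi', nx', p', e1, e2, hinv', hle, ?_, hxs⟩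
        intro y hy
        exact hvs y (List.mem_append.mpr (Or.inl hy))
      · have hvf : ((valD.get? u).getD none == (valD.get? v).getD none) = false := by
          simpa using hv
        have hA : aDiscover valD ((valD.get? v).getD none) vRegion (region, nreg, vis, nxt) u
            = (region.insert u nreg, nreg + 1, vis ++ [u], nxt ++ [u]) := by
          simp only [aDiscover, hcf, Bool.false_eq_true, if_false, hvf, hvisadd, hnxtadd]
        rw [hA, hB]
        have hk : (region.insert u nreg).keys = vis ++ [u] := by
          rw [PySem.Dict.keys_insert_of_not_contains _ _ hukc, h1]
        have hvals : (region.insert u nreg).values = region.values ++ [nreg] := by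
          simp only [PySem.Dict.values, PySem.Dict.items_insert_of_not_contains _ _ hukc,
            List.map_append, List.map_cons, List.map_nil]
        have hpos : (0 : Int) ≤ nreg := by omega
        have hset : PySem.Set.ofList (region.insert u nreg).values
            = PySem.List.pyRange 0 (nreg + 1) 1 := by
          rw [hvals, PySem.Set.ofList_append_singleton, h2,
            PySem.Set.add_of_not_mem (by
              intro hmem
              exact absurd (PySem.List.mem_pyRange_one.mp hmem).2 (lt_irrefl _)),
            PySem.List.pyRange_one_succ_right hpos]
        have hmism : (mismCount valD (pairs ++ [(v, u)]) : Int)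
            = (mismCount valD pairs : Int) + 1 := by
          have hne : (valD.get? u).getD none ≠ (valD.get? v).getD none := by
            intro heq; exact hv (beq_iff_eq.mpr heq)
          have hvv : (((valD.get? v).getD none == (valD.get? u).getD none)) = false :=
            beq_eq_false_iff_ne.mpr (Ne.symm hne)
          simp [mismCount, List.countP_append, hvv]
        obtain ⟨r', n', vi', nx', p', e1, e2, hinv', hle, hvs, hxs⟩ :=
          ih (region.insert u nreg) (nreg + 1) (vis ++ [u]) (nxt ++ [u]) (pairs ++ [(v, u)])
            ⟨hk, hset, by omega⟩ h0 (by omega) hnxt'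
        refine ⟨r', n', vi', nx', p', e1, e2, hinv', by omega, ?_, hxs⟩
        intro y hy
        exact hvs y (List.mem_append.mpr (Or.inl hy))

theorem pass_corr (adjD : PySem.Dict Int (List Int)) (valD : PySem.Dict Int (Option Int)) :
    ∀ (shell : List Int) (region : PySem.Dict Int Int) (nreg : Int) (vis nxt : PySem.Set Int)
      (pairs : List (Int × Int)),
    BfsInv valD region nreg vis pairs →
    (∀ v ∈ shell, v ∈ vis) → (∀ y ∈ nxt, y ∈ vis) →
    ∃ region' nreg' vis' nxt' pairs',
      shell.foldl (aVisit adjD valD) (region, nreg, vis, nxt) = (region', nreg', vis', nxt') ∧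
      shell.foldl (bVisit adjD) (pairs, vis, nxt) = (pairs', vis', nxt') ∧
      BfsInv valD region' nreg' vis' pairs' ∧ (∀ y ∈ nxt', y ∈ vis') := by
  intro shell
  induction shell with
  | nil =>
    intro region nreg vis nxt pairs hinv _ hnxt
    exact ⟨region, nreg, vis, nxt, pairs, rfl, rfl, hinv, hnxt⟩
  | cons v rest ih =>
    intro region nreg vis nxt pairs hinv hshell hnxt
    obtain ⟨h1, h2, h3⟩ := hinv
    have hvk : v ∈ region.keys := h1 ▸ hshell v (List.mem_cons_self)
    have hval : (region.get? v).getD 0 ∈ region.values := by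
      rw [← PySem.Dict.getD_eq_get?_getD]
      exact getD_mem_values region v hvk 0
    have hmem : (region.get? v).getD 0 ∈ PySem.List.pyRange 0 nreg 1 :=
      h2 ▸ (PySem.Set.mem_ofList _ _).mpr hval
    have hbounds := PySem.List.mem_pyRange_one.mp hmem
    obtain ⟨r1, n1, v1, x1, p1, hA1, hB1, hinv1, hle1, hvsub1, hxsub1⟩ :=
      inner_corr valD v ((region.get? v).getD 0)
        (PySem.List.sorted ((adjD.get? v).getD []) (fun y => y) false)
        region nreg vis nxt pairs ⟨h1, h2, h3⟩ hbounds.1 hbounds.2 hnxt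
    simp only [List.foldl_cons]
    have hAv : aVisit adjD valD (region, nreg, vis, nxt) v = (r1, n1, v1, x1) := by
      simp only [aVisit]
      exact hA1
    have hBv : bVisit adjD (pairs, vis, nxt) v = (p1, v1, x1) := by
      simp only [bVisit]
      exact hB1
    rw [hAv, hBv]
    exact ih r1 n1 v1 x1 p1 hinv1 (fun w hw => hvsub1 w (hshell w (List.mem_cons_of_mem v hw))) hxsub1

theorem loop_corr (adjD : PySem.Dict Int (List Int)) (valD : PySem.Dict Int (Option Int)) :
    ∀ (fuel : Nat) (shell : PySem.Set Int) (region : PySem.Dict Int Int) (nreg : Int)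
      (vis : PySem.Set Int) (pairs : List (Int × Int)),
    BfsInv valD region nreg vis pairs →
    (∀ v ∈ shell, v ∈ vis) →
    ((PySem.Set.ofList (aBFS adjD valD fuel shell (region, nreg, vis)).values).length : Int)
      = 1 + (mismCount valD (bBFS adjD fuel shell vis pairs) : Int) := by
  intro fuel
  induction fuel with
  | zero =>
    intro shell region nreg vis pairs hinv _
    obtain ⟨h1, h2, h3⟩ := hinv
    simp only [aBFS, bBFS]
    rw [h2, PySem.List.length_pyRange_one]
    omega
  | succ fuel ih =>
    intro shell region nreg vis pairs hinv hshell
    by_cases hs : shell = []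
    · obtain ⟨h1, h2, h3⟩ := hinv
      subst hs
      simp only [aBFS, bBFS, if_true]
      rw [h2, PySem.List.length_pyRange_one]
      omega
    · simp only [aBFS, bBFS, if_neg hs]
      obtain ⟨r1, n1, v1, x1, p1, hA1, hB1, hinv1, hxsub1⟩ :=
        pass_corr adjD valD shell region nreg vis PySem.Set.empty pairs hinv hshell
          (by intro y hy; cases hy)
      have hB1' : List.foldl (bVisit adjD) (pairs, vis, ([] : List Int)) shell = (p1, v1, x1) := hB1
      rw [hA1, hB1']
      exact ih x1 r1 n1 v1 p1 hinv1 hxsub1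

theorem count_corr (adjD : PySem.Dict Int (List Int)) (valD : PySem.Dict Int (Option Int))
    (x : Int) (fuel : Nat) :
    ((PySem.Set.ofList (aBFS adjD valD fuel (PySem.Set.ofList [x])
        (PySem.Dict.ofList [(x, 0)], 1, PySem.Set.ofList [x])).values).length : Int)
      = 1 + (mismCount valD (bBFS adjD fuel [x] (PySem.Set.ofList [x]) []) : Int) := by
  exact loop_corr adjD valD fuel (PySem.Set.ofList [x]) (PySem.Dict.ofList [(x, 0)]) 1
    (PySem.Set.ofList [x]) [] ⟨rfl, rfl, by simp [mismCount]⟩ (fun _ h => h)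

theorem beq_shift (m : Nat) (t : Int) : ((1 + (m : Int)) == t + 1) = ((m : Int) == t) := by
  by_cases h : (m : Int) = t
  · rw [beq_iff_eq.mpr (by omega : (1 + (m : Int)) = t + 1), beq_iff_eq.mpr h]
  · rw [beq_eq_false_iff_ne.mpr (by omega : (1 + (m : Int)) ≠ t + 1), beq_eq_false_iff_ne.mpr h]

theorem outer_corr (adjD : PySem.Dict Int (List Int)) (ntarget : Int) (internals : List Int)
    (fuel : Nat) (pairs : List (Int × Int))
    (hcount : ∀ cur : PySem.Dict Int (Option Int),
      ((PySem.Set.ofList (getRegionsA adjD cur fuel).values).length : Int)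
        = 1 + (mismCount cur pairs : Int)) :
    ∀ (vs : List (List Int)) (acc : List (List (Int × Int))) (cur : PySem.Dict Int (Option Int)),
    vs.foldl
      (fun (acc : List (List (Int × Int)) × PySem.Dict Int (Option Int)) values =>
        let cur := (internals.zip values).foldl (fun d p => d.insert p.1 (some p.2)) acc.2
        if (((PySem.Set.ofList (getRegionsA adjD cur fuel).values).length : Int) == ntarget + 1) then
          (acc.1 ++ [cur.items.map (fun p => (p.1, p.2.getD 0))], cur)
        else (acc.1, cur)) (acc, cur)
    = vs.foldl
      (fun (acc : List (List (Int × Int)) × PySem.Dict Int (Option Int)) values =>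
        let cur := (internals.zip values).foldl (fun d p => d.insert p.1 (some p.2)) acc.2
        if ((mismCount cur pairs : Int) == ntarget) then
          (acc.1 ++ [cur.items.map (fun p => (p.1, p.2.getD 0))], cur)
        else (acc.1, cur)) (acc, cur) := by
  intro vs acc cur
  apply List.foldl_ext
  intro st values _
  dsimp only
  rw [hcount, beq_shift]

theorem dict_ofList_keys (l : List (Int × List Int)) :
    (PySem.Dict.ofList l).keys = PySem.Set.ofList (l.map (·.1)) := by
  simp [PySem.Dict.ofList, PySem.Dict.update, PySem.Dict.keys_foldl_insert_key, PySem.Dict.keys_empty]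
  rfl

-- ===== VERDICT (by name: the statement is the Claim_ definition above) =====
theorem gen_assignments_brute_spec : Claim_equal_gen_assignments_brute := by
  intro id_to_adj id_to_val ntarget nbranches internals _ hpre
  obtain ⟨hne, -⟩ := hpre
  unfold Spec_gen_assignments_brute
  have hkeys : (PySem.Dict.ofList id_to_adj).keys ≠ [] := by
    obtain ⟨p, t, rfl⟩ := List.exists_cons_of_ne_nil hne
    have hp : p.1 ∈ (PySem.Dict.ofList (p :: t)).keys := by
      rw [dict_ofList_keys]
      exact (PySem.Set.mem_ofList _ _).mpr (by simp)
    exact List.ne_nil_of_mem hp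
  cases hmin : PySem.List.min? (PySem.Dict.ofList id_to_adj).keys (fun y => y) with
  | none => exact absurd ((PySem.List.min?_eq_none_iff _ _).mp hmin) hkeys
  | some x =>
    have hcount : ∀ cur : PySem.Dict Int (Option Int),
        ((PySem.Set.ofList (getRegionsA (PySem.Dict.ofList id_to_adj) cur (bfsFuel id_to_adj)).values).length : Int)
          = 1 + (mismCount cur (bBFS (PySem.Dict.ofList id_to_adj) (bfsFuel id_to_adj) [x] (PySem.Set.ofList [x]) []) : Int) := by
      intro cur
      rw [getRegionsA, hmin]
      exact count_corr _ _ _ _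
    show (_ : List (List (Int × Int)) × PySem.Dict Int (Option Int)).1 = _
    rw [gen_assignments_brute_alt, hmin]
    exact congrArg Prod.fst
      (outer_corr (PySem.Dict.ofList id_to_adj) ntarget internals (bfsFuel id_to_adj) _ hcount
        (pyProductPM internals.length) [] (PySem.Dict.ofList id_to_val))
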